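-- pv_equiv track=rewrite | github.com/LJH-LBJ/vllm-omni | vllm_omni/distributed/omni_connectors/adapter.py | compute_talker_prompt_ids_length
-- ===== SOURCE A (Python) =====
-- def compute_talker_prompt_ids_length(prompt_ids: list[int]) -> int:
--     """Compute the length of the talker prompt ids.
--
--     Args:
--         prompt_ids: The prompt ids tensor.
--
--     Returns:
--         The length of the talker prompt ids.
--     """
--     im_start_token_id = 151644
--     system_token_id = 8948
--     user_token_id = 872
--     assistant_token_id = 77091
--     im_start_indexes = [i for i in range(len(prompt_ids)) if prompt_ids[i] == im_start_token_id]
--     im_start_indexes.append(len(prompt_ids))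
--     sum_user_len = 0
--     assistant_len = 0
--     for i in range(len(im_start_indexes) - 1):
--         s = im_start_indexes[i]
--         e = im_start_indexes[i + 1]
--         role = prompt_ids[s + 1]
--         if role == system_token_id:
--             continue
--         elif role == user_token_id:
--             sum_user_len += e - s
--         elif role == assistant_token_id and i == len(im_start_indexes) - 2:
--             assistant_len += 9  # 3 + 4 + 1 + 1
--         else:
--             pass
--
--     return sum_user_len + assistant_len
-- ===== SOURCE B (Python) =====
-- def compute_talker_prompt_ids_length(prompt_ids: list[int]) -> int:
--     """Single streaming pass: track the open segment's start and role."""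
--     im_start_token_id = 151644
--     user_token_id = 872
--     assistant_token_id = 77091
--     total = 0
--     seg_start = None
--     seg_role = None
--     for i, tok in enumerate(prompt_ids):
--         if tok == im_start_token_id:
--             if seg_role == user_token_id:
--                 total += i - seg_start
--             seg_start = i
--             seg_role = prompt_ids[i + 1]
--     if seg_start is not None:
--         if seg_role == user_token_id:
--             total += len(prompt_ids) - seg_start
--         elif seg_role == assistant_token_id:
--             total += 9
--     return total
-- ===== Notes on version B (the rewrite author's own statement) =====
-- stated objective: simpler
-- what changed: Replaces the two-phase index-collection (build the list of im_start indexes, then loop over consecutive index pairs) with one streaming pass that keeps the currently open segment's start and role and closes segments as the next im_start or the end of input is reached.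
-- outside the precondition, e.g. on compute_talker_prompt_ids_length([151644]): A raises IndexError, B raises IndexError
import Mathlib
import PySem

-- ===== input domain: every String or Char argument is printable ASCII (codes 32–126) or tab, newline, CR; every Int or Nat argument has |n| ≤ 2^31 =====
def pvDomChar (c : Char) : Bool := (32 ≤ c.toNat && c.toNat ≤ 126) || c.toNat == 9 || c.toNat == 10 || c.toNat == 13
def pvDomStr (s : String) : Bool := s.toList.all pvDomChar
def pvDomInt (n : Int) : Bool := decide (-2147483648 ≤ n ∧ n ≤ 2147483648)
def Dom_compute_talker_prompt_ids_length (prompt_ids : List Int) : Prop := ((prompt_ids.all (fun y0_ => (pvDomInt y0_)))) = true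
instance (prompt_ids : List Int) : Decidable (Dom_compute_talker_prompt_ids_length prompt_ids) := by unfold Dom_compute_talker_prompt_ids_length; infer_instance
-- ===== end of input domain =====

-- B replaces A's two-phase scan (collect im_start indexes, then loop over index pairs) by a
-- single streaming pass keeping the open segment's start and role; same O(n) cost, simpler.


-- ===== PORT A =====
-- the body of A's `for i in range(len(im_start_indexes) - 1)` loop, state = (sum_user_len, assistant_len)
def pvBodyA (prompt_ids : List Int) (im_start_indexes : List Nat) (st : Int × Int) (i : Nat) : Int × Int :=
  let s := im_start_indexes.getD i 0
  let e := im_start_indexes.getD (i + 1) 0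
  -- prompt_ids[s + 1]: Python raises IndexError when s + 1 = len(prompt_ids); Pre_ excludes that
  let role := prompt_ids.getD (s + 1) 0
  if role = 8948 then st
  else if role = 872 then (st.1 + ((e : Int) - (s : Int)), st.2)
  else if role = 77091 ∧ i = im_start_indexes.length - 2 then (st.1, st.2 + 9)
  else st

def compute_talker_prompt_ids_length (prompt_ids : List Int) : Int :=
  let im_start_indexes : List Nat :=
    ((List.range prompt_ids.length).filter (fun i => prompt_ids.getD i 0 == 151644)) ++ [prompt_ids.length]
  let st := (List.range (im_start_indexes.length - 1)).foldl (pvBodyA prompt_ids im_start_indexes) (0, 0)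
  st.1 + st.2

-- ===== PORT B =====
-- the body of B's `for i, tok in enumerate(prompt_ids)` loop; state = (total, open segment (start, role))
def pvStepB (prompt_ids : List Int) (st : Int × Option (Int × Int)) (p : Int × Int) : Int × Option (Int × Int) :=
  if p.2 = 151644 then
    ((match st.2 with
      | some (s, r) => if r = 872 then st.1 + (p.1 - s) else st.1
      | none => st.1),
     -- prompt_ids[i + 1]: Python raises IndexError when i is the last index; Pre_ excludes that
     some (p.1, PySem.List.pyGetD prompt_ids (p.1 + 1) 0))
  else st

-- B's final close of the still-open segment after the loop
def pvFinishB (prompt_ids : List Int) (st : Int × Option (Int × Int)) : Int :=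
  match st.2 with
  | some (s, r) =>
      if r = 872 then st.1 + ((prompt_ids.length : Int) - s)
      else if r = 77091 then st.1 + 9
      else st.1
  | none => st.1

def compute_talker_prompt_ids_length_alt (prompt_ids : List Int) : Int :=
  pvFinishB prompt_ids ((PySem.List.enumerate prompt_ids 0).foldl (pvStepB prompt_ids) (0, none))

-- ===== PRECONDITION & SPEC =====
-- A (and B) raise IndexError exactly when the last token is the im_start token 151644
-- (the role lookup prompt_ids[s + 1] overruns); Pre_ excludes exactly those inputs.
def Pre_compute_talker_prompt_ids_length (prompt_ids : List Int) : Prop :=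
  prompt_ids.getLast? ≠ some 151644
instance (prompt_ids : List Int) : Decidable (Pre_compute_talker_prompt_ids_length prompt_ids) := by
  unfold Pre_compute_talker_prompt_ids_length; infer_instance

def pvWitness_compute_talker_prompt_ids_length : List Int := [151644, 872, 5, 5]

def Spec_compute_talker_prompt_ids_length (prompt_ids : List Int) (out : Int) : Prop := out = compute_talker_prompt_ids_length_alt prompt_ids
instance (prompt_ids : List Int) (out : Int) : Decidable (Spec_compute_talker_prompt_ids_length prompt_ids out) := by unfold Spec_compute_talker_prompt_ids_length; infer_instance

-- ===== CLAIM (what is proved, stated in full; the proofs are below) =====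
def Claim_equal_compute_talker_prompt_ids_length : Prop := ∀ (prompt_ids : List Int), Dom_compute_talker_prompt_ids_length prompt_ids → Pre_compute_talker_prompt_ids_length prompt_ids → Spec_compute_talker_prompt_ids_length prompt_ids (compute_talker_prompt_ids_length prompt_ids)

-- ===== LEMMAS AND PROOFS =====

def pvPosFrom : List Int → Nat → List Nat
  | [], _ => []
  | x :: xs, k => if x = 151644 then k :: pvPosFrom xs (k + 1) else pvPosFrom xs (k + 1)

def pvSegSum (L : List Int) : List Nat → Int
  | [s, e] =>
      if L.getD (s + 1) 0 = 872 then ((e : Int) - (s : Int))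
      else if L.getD (s + 1) 0 = 77091 then 9 else 0
  | s :: e :: rest =>
      (if L.getD (s + 1) 0 = 872 then ((e : Int) - (s : Int)) else 0) + pvSegSum L (e :: rest)
  | _ => 0

lemma pv_filter_eq_posFrom (L : List Int) :
    ∀ (M : List Int) (k : Nat), L.drop k = M →
      (List.range' k M.length).filter (fun i => L.getD i 0 == 151644) = pvPosFrom M k := by
  intro M
  induction M with
  | nil => intro k _; simp [pvPosFrom]
  | cons x xs ih =>
    intro k h
    have hx : L[k]? = some x := by
      have h0 : (List.drop k L)[0]? = L[k + 0]? := List.getElem?_drop ..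
      rw [h] at h0; simpa using h0.symm
    have hxs : L.drop (k + 1) = xs := by
      have h1 : (List.drop k L).tail = L.drop (k + 1) := List.tail_drop ..
      rw [h] at h1; simpa using h1.symm
    have ih' : List.filter (fun i => L[i]?.getD 0 == 151644) (List.range' (k+1) xs.length)
        = pvPosFrom xs (k+1) := by simpa [List.getD] using ih (k+1) hxs
    rw [List.length_cons, List.range'_succ, List.filter_cons]
    by_cases hc : x = 151644 <;> simp [pvPosFrom, List.getD, hx, hc, ih']

lemma pv_foldA_eq (L : List Int) :
    ∀ (q : List Nat), q ≠ [] → ∀ (u a : Int),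
      (let st := (List.range (q.length - 1)).foldl (pvBodyA L q) (u, a); st.1 + st.2)
        = u + a + pvSegSum L q := by
  intro q
  induction q with
  | nil => intro h; exact absurd rfl h
  | cons s rest ih =>
    intro _ u a
    match rest with
    | [] => simp [pvSegSum]
    | e :: rest' =>
      show (List.foldl (pvBodyA L (s :: e :: rest')) (u, a) (List.range (rest'.length + 1 + 1 - 1))).1
          + (List.foldl (pvBodyA L (s :: e :: rest')) (u, a) (List.range (rest'.length + 1 + 1 - 1))).2
          = u + a + pvSegSum L (s :: e :: rest')
      rw [show rest'.length + 1 + 1 - 1 = rest'.length + 1 from rfl,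
          List.range_succ_eq_map, List.foldl_cons, List.foldl_map]
      have hcongr : ∀ (st : Int × Int) (i : Nat), i ∈ List.range rest'.length →
          pvBodyA L (s :: e :: rest') st (i + 1) = pvBodyA L (e :: rest') st i := by
        intro st i hi
        have hi' : i < rest'.length := List.mem_range.mp hi
        simp only [pvBodyA, List.getD_cons_succ, List.length_cons]
        by_cases hcond : i = rest'.length + 1 - 2
        · simp [hcond, show rest'.length - 1 + 1 = rest'.length from by omega]
        · simp [show ¬ (i + 1 = rest'.length) from by omega,
                show ¬ (i = rest'.length - 1) from by omega]
      simp only [Nat.succ_eq_add_one]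
      rw [PySem.List.foldl_congr_mem (List.range rest'.length)
            (fun st i => pvBodyA L (s :: e :: rest') st (i + 1)) (pvBodyA L (e :: rest'))
            (pvBodyA L (s :: e :: rest') (u, a) 0)
            (fun st i hi => hcongr st i hi)]
      match rest' with
      | [] =>
        -- q = [s, e]: the whole fold is the single first step, which IS the last pair
        simp only [List.length_nil, List.range_zero, List.foldl_nil]
        simp only [pvBodyA, pvSegSum, List.getD_cons_succ, List.getD_cons_zero, List.length_cons,
          List.length_nil]
        split_ifs <;> simp_all <;> omega
      | r :: rs =>
        -- rest' nonempty: the first step only closes a user segment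
        have hfirst : pvBodyA L (s :: e :: r :: rs) (u, a) 0
            = (u + (if L.getD (s + 1) 0 = 872 then ((e : Int) - (s : Int)) else 0), a) := by
          simp only [pvBodyA, List.getD_cons_succ, List.getD_cons_zero, List.length_cons]
          split_ifs <;> simp_all
        rw [hfirst]
        have ih' := ih (by simp) (u + (if L.getD (s + 1) 0 = 872 then ((e : Int) - (s : Int)) else 0)) a
        simp only [List.length_cons, Nat.add_sub_cancel] at ih' ⊢
        rw [ih']
        have hseg : pvSegSum L (s :: e :: r :: rs)
            = (if L.getD (s + 1) 0 = 872 then ((e : Int) - (s : Int)) else 0)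
              + pvSegSum L (e :: r :: rs) := rfl
        rw [hseg]; ring

lemma pvSegSum_cons_cons (L : List Int) (s e : Nat) (rest : List Nat) (h : rest ≠ []) :
    pvSegSum L (s :: e :: rest)
      = (if L.getD (s + 1) 0 = 872 then ((e : Int) - (s : Int)) else 0) + pvSegSum L (e :: rest) := by
  match rest with
  | r :: rs => rfl

lemma pv_foldB_some (L : List Int) :
    ∀ (M : List Int) (k : Nat), L.drop k = M → ∀ (t : Int) (sn : Nat),
      pvFinishB L ((PySem.List.enumerate M (k : Int)).foldl (pvStepB L)
          (t, some ((sn : Int), L.getD (sn + 1) 0)))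
        = t + pvSegSum L (sn :: (pvPosFrom M k ++ [L.length])) := by
  intro M
  induction M with
  | nil =>
    intro k _ t sn
    simp only [PySem.List.enumerate_nil, List.foldl_nil, pvFinishB, pvPosFrom, List.nil_append,
      pvSegSum]
    split_ifs <;> ring
  | cons x xs ih =>
    intro k h t sn
    have hxs : L.drop (k + 1) = xs := by
      have h1 : (List.drop k L).tail = L.drop (k + 1) := List.tail_drop ..
      rw [h] at h1; simpa using h1.symm
    rw [PySem.List.enumerate_cons, List.foldl_cons]
    by_cases hc : x = 151644
    · -- an im_start: close the open segment, open a new one at k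
      have hstep : pvStepB L (t, some ((sn : Int), L.getD (sn + 1) 0)) ((k : Int), x)
          = ((if L.getD (sn + 1) 0 = 872 then t + ((k : Int) - (sn : Int)) else t),
             some ((k : Int), L.getD (k + 1) 0)) := by
        simp only [pvStepB, hc]
        rw [show ((k : Int) + 1) = ((k + 1 : Nat) : Int) from by push_cast; ring,
          PySem.List.pyGetD_natCast]
        simp
      rw [hstep]
      have hrw : ((k : Int) + 1) = ((k + 1 : Nat) : Int) := by push_cast; ring
      rw [hrw]
      rw [ih (k + 1) hxs _ k]
      rw [show pvPosFrom (x :: xs) k = k :: pvPosFrom xs (k + 1) from by simp [pvPosFrom, hc]]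
      rw [List.cons_append,
        pvSegSum_cons_cons L sn k (pvPosFrom xs (k + 1) ++ [L.length]) (by simp)]
      split_ifs <;> ring
    · rw [show pvStepB L (t, some ((sn : Int), L.getD (sn + 1) 0)) ((k : Int), x)
            = (t, some ((sn : Int), L.getD (sn + 1) 0)) from by simp [pvStepB, hc]]
      have hrw : ((k : Int) + 1) = ((k + 1 : Nat) : Int) := by push_cast; ring
      rw [hrw, ih (k + 1) hxs t sn]
      rw [show pvPosFrom (x :: xs) k = pvPosFrom xs (k + 1) from by simp [pvPosFrom, hc]]

lemma pv_foldB_none (L : List Int) :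
    ∀ (M : List Int) (k : Nat), L.drop k = M → ∀ (t : Int),
      pvFinishB L ((PySem.List.enumerate M (k : Int)).foldl (pvStepB L) (t, none))
        = t + pvSegSum L (pvPosFrom M k ++ [L.length]) := by
  intro M
  induction M with
  | nil =>
    intro k _ t
    simp [PySem.List.enumerate_nil, pvFinishB, pvPosFrom, pvSegSum]
  | cons x xs ih =>
    intro k h t
    have hxs : L.drop (k + 1) = xs := by
      have h1 : (List.drop k L).tail = L.drop (k + 1) := List.tail_drop ..
      rw [h] at h1; simpa using h1.symm
    rw [PySem.List.enumerate_cons, List.foldl_cons]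
    by_cases hc : x = 151644
    · have hstep : pvStepB L (t, none) ((k : Int), x)
          = (t, some ((k : Int), L.getD (k + 1) 0)) := by
        simp only [pvStepB, hc]
        rw [show ((k : Int) + 1) = ((k + 1 : Nat) : Int) from by push_cast; ring,
          PySem.List.pyGetD_natCast]
        simp
      rw [hstep]
      have hrw : ((k : Int) + 1) = ((k + 1 : Nat) : Int) := by push_cast; ring
      rw [hrw, pv_foldB_some L xs (k + 1) hxs t k]
      rw [show pvPosFrom (x :: xs) k = k :: pvPosFrom xs (k + 1) from by simp [pvPosFrom, hc]]
      rw [List.cons_append]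
    · rw [show pvStepB L (t, none) ((k : Int), x) = (t, none) from by simp [pvStepB, hc]]
      have hrw : ((k : Int) + 1) = ((k + 1 : Nat) : Int) := by push_cast; ring
      rw [hrw, ih (k + 1) hxs t]
      rw [show pvPosFrom (x :: xs) k = pvPosFrom xs (k + 1) from by simp [pvPosFrom, hc]]


-- ===== VERDICT (by name: the statement is the Claim_ definition above) =====
theorem compute_talker_prompt_ids_length_spec : Claim_equal_compute_talker_prompt_ids_length := by
  intro L _ _
  unfold Spec_compute_talker_prompt_ids_length
  unfold compute_talker_prompt_ids_length compute_talker_prompt_ids_length_alt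
  have hfilter : (List.range L.length).filter (fun i => L.getD i 0 == 151644) = pvPosFrom L 0 := by
    have h0 := pv_filter_eq_posFrom L L 0 (by simp)
    simpa [List.range_eq_range'] using h0
  simp only [hfilter]
  have hA := pv_foldA_eq L (pvPosFrom L 0 ++ [L.length]) (by simp) 0 0
  simp only at hA
  rw [hA]
  have hB := pv_foldB_none L L 0 (by simp) 0
  simp only [Nat.cast_zero] at hB
  rw [hB]
  ring
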